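-- pv_equiv track=rewrite | github.com/siraxe/ComfyUI-PromptRelay | lora_schedule.py | build_lora_assignment
-- ===== SOURCE A (Python) =====
-- def build_lora_assignment(num_segments, lora_slot_map, extend_last):
--     """Map each segment index to a LoRA column index or -1 (no LoRA).
--
--     lora_slot_map: list of LoRA column indices or None, one per slot.
--                    Slot *i* maps to segment *i*.  ``None`` means that slot is "none".
--     extend_last: if True, the last assigned LoRA fills any remaining segments.
--     """
--     if num_segments == 0:
--         raise ValueError("At least one segment is required")
--
--     assignment = []
--     last_lora_idx = None
--
--     for seg_idx in range(num_segments):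
--         if seg_idx < len(lora_slot_map):
--             slot = lora_slot_map[seg_idx]
--             if slot is not None:
--                 assignment.append(slot)
--                 last_lora_idx = slot
--             else:
--                 # Slot is "none" — no LoRA unless extending
--                 assignment.append(last_lora_idx if extend_last and last_lora_idx is not None else -1)
--         else:
--             # Beyond the LoRA slots
--             assignment.append(last_lora_idx if extend_last and last_lora_idx is not None else -1)
--
--     return assignment
-- ===== SOURCE B (Python) =====
-- def build_lora_assignment(num_segments, lora_slot_map, extend_last):
--     if num_segments == 0:
--         raise ValueError("At least one segment is required")
--
--     def value_at(i):
--         # stateless per-segment lookup: the slot itself, else a backward search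
--         if i < len(lora_slot_map) and lora_slot_map[i] is not None:
--             return lora_slot_map[i]
--         if extend_last:
--             for j in range(min(i, len(lora_slot_map)) - 1, -1, -1):
--                 if lora_slot_map[j] is not None:
--                     return lora_slot_map[j]
--         return -1
--
--     return [value_at(i) for i in range(num_segments)]
-- ===== Notes on version B (the rewrite author's own statement) =====
-- stated objective: alternative
-- what changed: B drops A's stateful forward fill with a carry and instead computes each segment independently (a pointwise definition): the slot's own value if set, otherwise a backward search for the nearest earlier non-None slot (only when extend_last), else -1; O(n*m) worst case vs A's O(n). Pre_ excludes num_segments == 0, where A raises ValueError.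
import Mathlib
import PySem

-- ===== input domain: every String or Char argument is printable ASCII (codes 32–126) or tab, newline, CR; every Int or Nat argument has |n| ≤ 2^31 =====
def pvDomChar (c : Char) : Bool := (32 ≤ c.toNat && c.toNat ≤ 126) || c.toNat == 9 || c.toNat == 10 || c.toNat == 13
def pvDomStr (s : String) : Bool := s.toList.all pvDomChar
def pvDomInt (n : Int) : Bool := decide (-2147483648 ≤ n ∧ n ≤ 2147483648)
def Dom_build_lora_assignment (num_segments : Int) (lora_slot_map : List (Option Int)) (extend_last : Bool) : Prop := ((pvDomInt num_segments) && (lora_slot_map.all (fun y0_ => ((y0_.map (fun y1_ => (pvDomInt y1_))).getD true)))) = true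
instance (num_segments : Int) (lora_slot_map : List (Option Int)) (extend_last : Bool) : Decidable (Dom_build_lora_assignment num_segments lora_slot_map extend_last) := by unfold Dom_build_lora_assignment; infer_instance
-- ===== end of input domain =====

-- B replaces A's stateful forward fill (carry of the last LoRA) by a stateless pointwise rule: each segment's value is its own slot or a backward search for the nearest earlier non-None slot; alternative decomposition, not faster. Pre_ excludes num_segments == 0, where A raises ValueError.


-- ===== PORT A =====
-- `assignment.append(last_lora_idx if extend_last and last_lora_idx is not None else -1)`
def pvNoLora (e : Bool) : Option Int → Int
  | some l => if e then l else -1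
  | none => -1

-- one iteration of A's loop; state = (assignment, last_lora_idx)
def pvAStep (m : List (Option Int)) (e : Bool) (st : List Int × Option Int) (i : Int) : List Int × Option Int :=
  if i < (m.length : Int) then
    match PySem.List.pyGetD m i none with
    | some slot => (st.1 ++ [slot], some slot)
    | none => (st.1 ++ [pvNoLora e st.2], st.2)
  else
    (st.1 ++ [pvNoLora e st.2], st.2)

def build_lora_assignment (num_segments : Int) (lora_slot_map : List (Option Int)) (extend_last : Bool) : List Int :=
  ((PySem.List.pyRange 0 num_segments 1).foldl (pvAStep lora_slot_map extend_last) ([], none)).1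

-- ===== PORT B =====
-- the backward `for j in range(min(i, len) - 1, -1, -1)` loop with its early return
def pvBack (m : List (Option Int)) : List Int → Int
  | [] => -1
  | j :: js =>
    match PySem.List.pyGetD m j none with
    | some v => v
    | none => pvBack m js

-- `value_at(i)`
def pvValueAt (m : List (Option Int)) (e : Bool) (i : Int) : Int :=
  match (if i < (m.length : Int) then PySem.List.pyGetD m i none else none) with
  | some v => v
  | none =>
    if e then pvBack m (PySem.List.pyRange (min i (m.length : Int) - 1) (-1) (-1)) else -1

def build_lora_assignment_alt (num_segments : Int) (lora_slot_map : List (Option Int)) (extend_last : Bool) : List Int :=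
  (PySem.List.pyRange 0 num_segments 1).map (pvValueAt lora_slot_map extend_last)

-- ===== PRECONDITION & SPEC =====
-- A raises ValueError when num_segments == 0; excluded.
def Pre_build_lora_assignment (num_segments : Int) (lora_slot_map : List (Option Int)) (extend_last : Bool) : Prop := num_segments ≠ 0
instance (num_segments : Int) (lora_slot_map : List (Option Int)) (extend_last : Bool) : Decidable (Pre_build_lora_assignment num_segments lora_slot_map extend_last) := by unfold Pre_build_lora_assignment; infer_instance
def pvWitness_build_lora_assignment : Int × List (Option Int) × Bool := (4, [some 2, none, some 0], true)
def Spec_build_lora_assignment (num_segments : Int) (lora_slot_map : List (Option Int)) (extend_last : Bool) (out : List Int) : Prop := out = build_lora_assignment_alt num_segments lora_slot_map extend_last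
instance (num_segments : Int) (lora_slot_map : List (Option Int)) (extend_last : Bool) (out : List Int) : Decidable (Spec_build_lora_assignment num_segments lora_slot_map extend_last out) := by unfold Spec_build_lora_assignment; infer_instance

-- ===== CLAIM (what is proved, stated in full; the proofs are below) =====
def Claim_equal_build_lora_assignment : Prop := ∀ (num_segments : Int) (lora_slot_map : List (Option Int)) (extend_last : Bool), Dom_build_lora_assignment num_segments lora_slot_map extend_last → Pre_build_lora_assignment num_segments lora_slot_map extend_last → Spec_build_lora_assignment num_segments lora_slot_map extend_last (build_lora_assignment num_segments lora_slot_map extend_last)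

-- ===== LEMMAS AND PROOFS =====

-- Option-valued view of B's backward search
def pvBackOpt (m : List (Option Int)) : List Int → Option Int
  | [] => none
  | j :: js =>
    match PySem.List.pyGetD m j none with
    | some v => some v
    | none => pvBackOpt m js

theorem pvBack_eq_opt (m : List (Option Int)) (l : List Int) :
    pvBack m l = (pvBackOpt m l).getD (-1) := by
  induction l with
  | nil => rfl
  | cons j js ih =>
    simp only [pvBack, pvBackOpt]
    cases PySem.List.pyGetD m j none <;> simp [ih]

-- A's carry after processing indices 0..i-1, expressed as B's backward search
def pvCarry (m : List (Option Int)) (i : Int) : Option Int :=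
  pvBackOpt m (PySem.List.pyRange (min i (m.length : Int) - 1) (-1) (-1))

theorem pvNoLora_eq_valueAt (m : List (Option Int)) (e : Bool) (i : Int)
    (h : (if i < (m.length : Int) then PySem.List.pyGetD m i none else none) = none) :
    pvNoLora e (pvCarry m i) = pvValueAt m e i := by
  unfold pvValueAt
  rw [h]
  unfold pvCarry
  rw [pvBack_eq_opt] at *
  cases hc : pvBackOpt m (PySem.List.pyRange (min i (m.length : Int) - 1) (-1) (-1)) <;>
    cases e <;> simp [pvNoLora]

theorem pvCarry_succ_of_none (m : List (Option Int)) (i : Int) (hi : 0 ≤ i)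
    (h : (if i < (m.length : Int) then PySem.List.pyGetD m i none else none) = none) :
    pvCarry m (i + 1) = pvCarry m i := by
  unfold pvCarry
  by_cases hlt : i < (m.length : Int)
  · have hmin1 : min (i + 1) (m.length : Int) - 1 = i := by omega
    have hmin0 : min i (m.length : Int) - 1 = i - 1 := by omega
    rw [hmin1, hmin0, PySem.List.pyRange_neg_one_cons (by omega)]
    simp only [pvBackOpt]
    rw [if_pos hlt] at h
    rw [h]
  · have : min (i + 1) (m.length : Int) - 1 = min i (m.length : Int) - 1 := by omega
    rw [this]

theorem pvCarry_succ_of_some (m : List (Option Int)) (i : Int) (hi : 0 ≤ i) (v : Int)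
    (h : (if i < (m.length : Int) then PySem.List.pyGetD m i none else none) = some v) :
    pvCarry m (i + 1) = some v := by
  by_cases hlt : i < (m.length : Int)
  · unfold pvCarry
    have hmin1 : min (i + 1) (m.length : Int) - 1 = i := by omega
    rw [hmin1, PySem.List.pyRange_neg_one_cons (by omega)]
    simp only [pvBackOpt]
    rw [if_pos hlt] at h
    rw [h]
  · rw [if_neg hlt] at h; exact absurd h (by simp)

-- one step of A, rephrased through B's pointwise function
theorem pvAStep_eq (m : List (Option Int)) (e : Bool) (acc : List Int) (i : Int) (hi : 0 ≤ i) :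
    pvAStep m e (acc, pvCarry m i) i = (acc ++ [pvValueAt m e i], pvCarry m (i + 1)) := by
  unfold pvAStep
  by_cases hlt : i < (m.length : Int)
  · rw [if_pos hlt]
    cases hg : PySem.List.pyGetD m i none with
    | some v =>
      have h : (if i < (m.length : Int) then PySem.List.pyGetD m i none else none) = some v := by
        rw [if_pos hlt]; exact hg
      simp only [hg]
      rw [pvCarry_succ_of_some m i hi v h]
      unfold pvValueAt
      rw [h]
    | none =>
      have h : (if i < (m.length : Int) then PySem.List.pyGetD m i none else none) = none := by
        rw [if_pos hlt]; exact hg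
      simp only [hg]
      rw [pvCarry_succ_of_none m i hi h, pvNoLora_eq_valueAt m e i h]
  · rw [if_neg hlt]
    have h : (if i < (m.length : Int) then PySem.List.pyGetD m i none else none) = none := by
      rw [if_neg hlt]
    rw [pvCarry_succ_of_none m i hi h, pvNoLora_eq_valueAt m e i h]

-- A's fold over any index range equals acc ++ B's pointwise map, when the carry is in sync
theorem pvFold_eq_map (m : List (Option Int)) (e : Bool) (b : Int) :
    ∀ (a : Int) (acc : List Int), 0 ≤ a →
      (PySem.List.pyRange a b 1).foldl (pvAStep m e) (acc, pvCarry m a) =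
        (acc ++ (PySem.List.pyRange a b 1).map (pvValueAt m e), pvCarry m (max a b)) := by
  have H : ∀ (k : Nat) (a : Int) (acc : List Int), 0 ≤ a → b - a ≤ k →
      (PySem.List.pyRange a b 1).foldl (pvAStep m e) (acc, pvCarry m a) =
        (acc ++ (PySem.List.pyRange a b 1).map (pvValueAt m e), pvCarry m (max a b)) := by
    intro k
    induction k with
    | zero =>
      intro a acc ha hk
      rw [PySem.List.pyRange_one_eq_nil (by omega)]
      simp only [List.foldl_nil, List.map_nil, List.append_nil]
      have : max a b = a := by omega
      rw [this]
    | succ k ih =>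
      intro a acc ha hk
      by_cases hab : a < b
      · rw [PySem.List.pyRange_one_cons hab]
        simp only [List.foldl_cons, List.map_cons]
        rw [pvAStep_eq m e acc a ha, ih (a + 1) _ (by omega) (by omega)]
        have : max (a + 1) b = max a b := by omega
        rw [this, List.append_assoc]
        rfl
      · rw [PySem.List.pyRange_one_eq_nil (by omega)]
        simp only [List.foldl_nil, List.map_nil, List.append_nil]
        have : max a b = a := by omega
        rw [this]
  intro a acc ha
  exact H (b - a).toNat a acc ha (by omega)

theorem pvCarry_zero (m : List (Option Int)) : pvCarry m 0 = none := by
  unfold pvCarry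
  rw [PySem.List.pyRange_neg_one_eq_nil (by omega)]
  rfl

-- ===== VERDICT (by name: the statement is the Claim_ definition above) =====
theorem build_lora_assignment_spec : Claim_equal_build_lora_assignment := by
  intro n m e _ _
  unfold Spec_build_lora_assignment build_lora_assignment build_lora_assignment_alt
  rw [← pvCarry_zero m, pvFold_eq_map m e n 0 [] le_rfl]
  simp
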